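-- pv_equiv track=rewrite | github.com/dlt-v/code-snippets | python/educative_io/high_and_lows.py | count_low_high
-- ===== SOURCE A (Python) =====
-- def count_low_high(num_list):
--     lows_and_highs = [0, 0]
--     for item in num_list:
--         if item > 50 or item % 3 == 0:
--             lows_and_highs[1] += 1
--         else:
--             lows_and_highs[0] += 1
--     return lows_and_highs
-- ===== SOURCE B (Python) =====
-- def count_low_high(num_list):
--     highs = [item for item in num_list if item > 50 or item % 3 == 0]
--     lows = [item for item in num_list if not (item > 50 or item % 3 == 0)]
--     return [len(lows), len(highs)]
-- ===== Notes on version B (the rewrite author's own statement) =====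
-- stated objective: alternative
-- what changed: B replaces A's single pass with a two-slot accumulator by two staged filter passes that materialise the low and high sublists and return their lengths.
import Mathlib
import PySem

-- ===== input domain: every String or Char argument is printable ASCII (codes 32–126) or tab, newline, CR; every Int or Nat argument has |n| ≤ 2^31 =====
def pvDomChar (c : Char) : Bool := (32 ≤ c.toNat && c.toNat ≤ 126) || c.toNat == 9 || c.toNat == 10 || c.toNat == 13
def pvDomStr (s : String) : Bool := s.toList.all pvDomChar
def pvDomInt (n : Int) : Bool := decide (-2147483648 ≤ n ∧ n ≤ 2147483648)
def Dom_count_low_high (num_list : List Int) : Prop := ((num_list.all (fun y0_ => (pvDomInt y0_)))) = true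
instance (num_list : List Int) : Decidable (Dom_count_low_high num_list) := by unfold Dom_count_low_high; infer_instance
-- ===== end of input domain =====

-- B builds the high and low sublists by two filter passes and returns their lengths (objective: alternative decomposition).

-- ===== PORT A =====
-- A: one pass with a two-slot accumulator [lows, highs].
def count_low_high (num_list : List Int) : List Int :=
  let lows_and_highs :=
    num_list.foldl
      (fun (acc : Int × Int) item =>
        if item > 50 ∨ PySem.Int.mod item 3 = 0 then (acc.1, acc.2 + 1)
        else (acc.1 + 1, acc.2))
      (0, 0)
  [lows_and_highs.1, lows_and_highs.2]

-- ===== PORT B =====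
-- B: two staged filter passes materialising each bucket, then lengths.
def count_low_high_alt (num_list : List Int) : List Int :=
  let highs := num_list.filter (fun item => decide (item > 50 ∨ PySem.Int.mod item 3 = 0))
  let lows := num_list.filter (fun item => !decide (item > 50 ∨ PySem.Int.mod item 3 = 0))
  [(lows.length : Int), (highs.length : Int)]

-- ===== PRECONDITION & SPEC =====
def Spec_count_low_high (num_list : List Int) (out : List Int) : Prop := out = count_low_high_alt num_list
instance (num_list : List Int) (out : List Int) : Decidable (Spec_count_low_high num_list out) := by unfold Spec_count_low_high; infer_instance

-- ===== CLAIM (what is proved, stated in full; the proofs are below) =====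
def Claim_equal_count_low_high : Prop := ∀ (num_list : List Int), Dom_count_low_high num_list → Spec_count_low_high num_list (count_low_high num_list)

-- ===== LEMMAS AND PROOFS =====
theorem count_low_high_fold_inv (xs : List Int) (lo hi : Int) :
    xs.foldl
      (fun (acc : Int × Int) item =>
        if item > 50 ∨ PySem.Int.mod item 3 = 0 then (acc.1, acc.2 + 1)
        else (acc.1 + 1, acc.2))
      (lo, hi)
    = (lo + ((xs.filter (fun item => !decide (item > 50 ∨ PySem.Int.mod item 3 = 0))).length : Int),
       hi + ((xs.filter (fun item => decide (item > 50 ∨ PySem.Int.mod item 3 = 0))).length : Int)) := by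
  induction xs generalizing lo hi with
  | nil => simp
  | cons x xs ih =>
    simp only [List.foldl_cons, List.filter_cons]
    by_cases hx : x > 50 ∨ PySem.Int.mod x 3 = 0
    · simp only [if_pos hx, hx, decide_true, Bool.not_true, ih]
      simp [Prod.ext_iff]
      push_cast; ring
    · simp only [if_neg hx, hx, decide_false, Bool.not_false, ih]
      simp [Prod.ext_iff]
      push_cast; ring

-- ===== VERDICT (by name: the statement is the Claim_ definition above) =====
theorem count_low_high_spec : Claim_equal_count_low_high := by
  intro num_list _
  unfold Spec_count_low_high count_low_high count_low_high_alt
  simp only [count_low_high_fold_inv num_list 0 0]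
  norm_num
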